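-- pv_equiv track=rewrite | github.com/jongwooo/algorithm | 프로그래머스/0/181890. 왼쪽 오른쪽/왼쪽 오른쪽.py | solution
-- ===== SOURCE A (Python) =====
-- def solution(str_list):
--     result = []
--     for i in range(len(str_list)):
--         if str_list[i] == 'l':
--             result = str_list[:i]
--             break
--         if str_list[i] == 'r':
--             result = str_list[i + 1:]
--             break
--     return result
-- ===== SOURCE B (Python) =====
-- def solution(str_list):
--     # Single streaming pass with an accumulator and a mode flag: never indexes or
--     # slices; collects the prefix until 'l' (returned immediately) or, after an
--     # 'r', restarts the accumulator and collects the tail.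
--     acc = []
--     collecting_tail = False
--     for s in str_list:
--         if collecting_tail:
--             acc.append(s)
--         elif s == 'l':
--             return acc
--         elif s == 'r':
--             acc = []
--             collecting_tail = True
--         else:
--             acc.append(s)
--     return acc if collecting_tail else []
-- ===== Notes on version B (the rewrite author's own statement) =====
-- stated objective: alternative
-- what changed: A scans by index and returns a slice of the original list at the break point; B is a streaming state machine that never indexes or slices: one pass pushing elements into an accumulator, returning it on 'l', and resetting it into tail-collection mode on 'r'.
import Mathlib
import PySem

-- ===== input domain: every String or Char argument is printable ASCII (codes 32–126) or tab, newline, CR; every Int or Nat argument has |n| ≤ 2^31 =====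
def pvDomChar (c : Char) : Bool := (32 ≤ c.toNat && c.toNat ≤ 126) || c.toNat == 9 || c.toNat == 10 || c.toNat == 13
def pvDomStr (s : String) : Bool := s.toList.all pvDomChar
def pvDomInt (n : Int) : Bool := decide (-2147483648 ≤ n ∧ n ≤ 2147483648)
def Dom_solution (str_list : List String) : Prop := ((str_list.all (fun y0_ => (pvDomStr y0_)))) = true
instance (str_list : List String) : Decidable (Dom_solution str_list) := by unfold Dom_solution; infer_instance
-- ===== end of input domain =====

-- B replaces A's index scan with slicing by a single streaming pass over the elements
-- with an accumulator and a tail-collection mode flag (alternative decomposition).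

-- ===== PORT A =====
-- the 'for i in range(len(str_list))' loop with its two break branches; 'result' starts as []
def solutionGo (str_list : List String) (i : Nat) : List String :=
  if h : i < str_list.length then
    if str_list[i] = "l" then PySem.List.slice str_list none (some (i : Int))        -- str_list[:i]
    else if str_list[i] = "r" then PySem.List.slice str_list (some ((i : Int) + 1)) none  -- str_list[i+1:]
    else solutionGo str_list (i + 1)
  else []
termination_by str_list.length - i

def solution (str_list : List String) : List String := solutionGo str_list 0

-- ===== PORT B =====
-- the 'for s in str_list' loop; state = (acc, collecting_tail); 'return acc' on 'l' is the
-- first branch's early exit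
def altGo : List String → List String → Bool → List String
  | [], acc, tail => if tail then acc else []
  | s :: rest, acc, tail =>
    if tail then altGo rest (acc ++ [s]) true
    else if s = "l" then acc
    else if s = "r" then altGo rest [] true
    else altGo rest (acc ++ [s]) false

def solution_alt (str_list : List String) : List String := altGo str_list [] false

-- ===== PRECONDITION & SPEC =====
def Spec_solution (str_list : List String) (out : List String) : Prop := out = solution_alt str_list
instance (str_list : List String) (out : List String) : Decidable (Spec_solution str_list out) := by unfold Spec_solution; infer_instance

-- ===== CLAIM (what is proved, stated in full; the proofs are below) =====
def Claim_equal_solution : Prop := ∀ (str_list : List String), Dom_solution str_list → Spec_solution str_list (solution str_list)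

-- ===== LEMMAS AND PROOFS =====

-- tail-collection mode appends the whole remaining list to the accumulator
lemma altGo_tail : ∀ (ys acc : List String), altGo ys acc true = acc ++ ys := by
  intro ys
  induction ys with
  | nil => intro acc; simp [altGo]
  | cons s rest ih => intro acc; simp [altGo, ih]

-- invariant: A's loop from index i equals B's scan of the remaining suffix with the
-- scanned prefix as accumulator
lemma go_eq_alt : ∀ (n : Nat) (xs : List String) (i : Nat), xs.length - i ≤ n →
    solutionGo xs i = altGo (xs.drop i) (xs.take i) false := by
  intro n
  induction n with
  | zero =>
    intro xs i hn
    have hi : xs.length ≤ i := by omega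
    rw [solutionGo]
    simp [Nat.not_lt_of_le hi, List.drop_eq_nil_of_le hi, altGo]
  | succ n ih =>
    intro xs i hn
    rw [solutionGo]
    by_cases hi : i < xs.length
    · have hdrop : xs.drop i = xs[i] :: xs.drop (i + 1) := List.drop_eq_getElem_cons hi
      have htake : xs.take (i + 1) = xs.take i ++ [xs[i]] := by
        rw [← List.take_concat_get (l := xs) (i := i) (h := hi), List.concat_eq_append]
      simp only [hi, dite_true, hdrop, altGo]
      by_cases hL : xs[i] = "l"
      · simp [hL, PySem.List.slice_to_natCast]
      · by_cases hR : xs[i] = "r"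
        · simp only [hR, ite_true, Bool.false_eq_true, altGo_tail, List.nil_append]
          rw [show ((i : Int) + 1) = ((i + 1 : Nat) : Int) by push_cast; ring,
              PySem.List.slice_from_natCast]
          simp
        · simp only [hL, hR, ite_false, Bool.false_eq_true, ← htake]
          exact ih xs (i + 1) (by omega)
    · have hi' : xs.length ≤ i := by omega
      simp [hi, List.drop_eq_nil_of_le hi', altGo]

-- ===== VERDICT (by name: the statement is the Claim_ definition above) =====
theorem solution_spec : Claim_equal_solution := by
  intro xs _
  unfold Spec_solution solution solution_alt
  exact go_eq_alt xs.length xs 0 (by omega)
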